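-- pv_equiv track=rewrite | github.com/qiboteam/qibo | src/qibo/models/encodings.py | _get_markers
-- ===== SOURCE A (Python) =====
-- def _get_markers(bitstring, last_run: bool = False):
--     """Subroutine of the Ehrlich algorithm."""
--     nqubits = len(bitstring)
--     markers = [len(bitstring) - 1]
--     for ind, value in zip(range(nqubits - 2, -1, -1), bitstring[::-1][1:]):
--         if value == bitstring[-1]:
--             markers.append(ind)
--         else:
--             break
--
--     markers = set(markers)
--
--     if not last_run:
--         markers = set(range(nqubits)) - markers
--
--     return markers
-- ===== SOURCE B (Python) =====
-- def _get_markers(bitstring, last_run: bool = False):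
--     """Subroutine of the Ehrlich algorithm."""
--     nqubits = len(bitstring)
--     # single forward pass: cut = 1 + (last index whose value differs from the
--     # final element), or 0 when the whole bitstring is one equal run
--     cut = 0
--     for i in range(nqubits - 1):
--         if bitstring[i] != bitstring[-1]:
--             cut = i + 1
--     if last_run:
--         return set(range(nqubits - 1, cut - 1, -1))
--     return set(range(cut))
-- ===== Notes on version B (the rewrite author's own statement) =====
-- stated objective: alternative
-- what changed: A scans backward with an early break accumulating a marker list and then takes a set difference against range(nqubits); B makes a single forward pass recording the last index whose value differs from the final element, so the result is one contiguous range built from that boundary, with no marker list and no set subtraction.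
-- intended difference: On the empty bitstring with last_run=True, A returns {-1} (the accidental marker len(bitstring)-1, not a valid index), while B returns the empty set, which is the intended marker set of an empty bitstring. — e.g. on _get_markers([], true): A returns [-1], B returns []
import Mathlib
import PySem

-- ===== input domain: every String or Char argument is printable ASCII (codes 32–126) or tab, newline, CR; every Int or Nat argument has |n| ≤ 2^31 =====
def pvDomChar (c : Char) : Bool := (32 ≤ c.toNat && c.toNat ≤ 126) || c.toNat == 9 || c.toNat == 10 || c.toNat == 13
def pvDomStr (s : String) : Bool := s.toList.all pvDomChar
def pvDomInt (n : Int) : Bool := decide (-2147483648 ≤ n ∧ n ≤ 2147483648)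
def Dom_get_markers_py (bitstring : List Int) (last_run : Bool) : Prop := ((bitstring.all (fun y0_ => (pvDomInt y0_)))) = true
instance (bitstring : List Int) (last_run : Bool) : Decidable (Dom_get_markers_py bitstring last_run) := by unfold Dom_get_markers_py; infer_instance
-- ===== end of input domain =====

-- B replaces A's backward break-scan that accumulates a marker list (then set-subtracts
-- it from range(nqubits)) by a single forward pass recording the last index whose value
-- differs from the final element; the result is one contiguous range (objective: alternative).

-- ===== PORT A =====
-- the for-loop over zip(range(nqubits-2,-1,-1), bitstring[::-1][1:]) with break
def getMarkersLoopA (last : Int) : List (Int × Int) → List Int → List Int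
  | [], markers => markers
  | (ind, value) :: rest, markers =>
    if value = last then getMarkersLoopA last rest (markers ++ [ind]) else markers

def get_markers_py (bitstring : List Int) (last_run : Bool) : List Int :=
  let nqubits : Int := bitstring.length
  -- bitstring[::-1][1:]
  let revTail := PySem.List.slice ((PySem.List.slice? bitstring none none (-1)).getD []) (some 1) none
  let pairs := (PySem.List.pyRange (nqubits - 2) (-1) (-1)).zip revTail
  -- bitstring[-1] is only compared inside the loop, which is empty when bitstring is empty
  let markers := getMarkersLoopA (PySem.List.pyGetD bitstring (-1) 0) pairs [nqubits - 1]
  let markersSet := PySem.Set.ofList markers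
  if !last_run then PySem.Set.diff (PySem.Set.ofList (PySem.List.pyRange 0 nqubits 1)) markersSet
  else markersSet

-- ===== PORT B =====
def get_markers_py_alt (bitstring : List Int) (last_run : Bool) : List Int :=
  let nqubits : Int := bitstring.length
  -- the forward for-loop over range(nqubits - 1) updating `cut` on a mismatch
  let cut := (PySem.List.pyRange 0 (nqubits - 1) 1).foldl
      (fun c i => if PySem.List.pyGetD bitstring i 0 ≠ PySem.List.pyGetD bitstring (-1) 0 then i + 1 else c) 0
  if last_run then PySem.Set.ofList (PySem.List.pyRange (nqubits - 1) (cut - 1) (-1))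
  else PySem.Set.ofList (PySem.List.pyRange 0 cut 1)

-- ===== PRECONDITION & SPEC =====
-- On the empty bitstring with last_run = true, A returns {-1} (the accidental marker
-- len(bitstring)-1, not a valid index), while B returns the empty set, the intended
-- marker set of an empty bitstring.
def D_get_markers_py (bitstring : List Int) (last_run : Bool) : Prop :=
  bitstring = [] ∧ last_run = true
instance (bitstring : List Int) (last_run : Bool) : Decidable (D_get_markers_py bitstring last_run) := by unfold D_get_markers_py; infer_instance

def Spec_get_markers_py (bitstring : List Int) (last_run : Bool) (out : List Int) : Prop := ¬ D_get_markers_py bitstring last_run → out = get_markers_py_alt bitstring last_run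
instance (bitstring : List Int) (last_run : Bool) (out : List Int) : Decidable (Spec_get_markers_py bitstring last_run out) := by unfold Spec_get_markers_py; infer_instance

def pvDiffWitness_get_markers_py : List Int × Bool := ([], true)
def pvDiffWitnessOut_get_markers_py : (List Int) × (List Int) := ([-1], [])

-- ===== CLAIM (what is proved, stated in full; the proofs are below) =====
def Claim_unchanged_get_markers_py : Prop := ∀ (bitstring : List Int) (last_run : Bool), Dom_get_markers_py bitstring last_run → Spec_get_markers_py bitstring last_run (get_markers_py bitstring last_run)
def Claim_changed_get_markers_py : Prop := Dom_get_markers_py (pvDiffWitness_get_markers_py.1) (pvDiffWitness_get_markers_py.2) ∧ D_get_markers_py (pvDiffWitness_get_markers_py.1) (pvDiffWitness_get_markers_py.2) ∧ get_markers_py (pvDiffWitness_get_markers_py.1) (pvDiffWitness_get_markers_py.2) = pvDiffWitnessOut_get_markers_py.1 ∧ get_markers_py_alt (pvDiffWitness_get_markers_py.1) (pvDiffWitness_get_markers_py.2) = pvDiffWitnessOut_get_markers_py.2 ∧ pvDiffWitnessOut_get_markers_py.1 ≠ pvDiffWitnessOut_get_markers_py.2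
def Claim_exact_get_markers_py : Prop := ∀ (bitstring : List Int) (last_run : Bool), Dom_get_markers_py bitstring last_run → D_get_markers_py bitstring last_run → get_markers_py bitstring last_run ≠ get_markers_py_alt bitstring last_run

-- ===== LEMMAS AND PROOFS =====

-- the zipped pair list of A is the index list of the countdown tagged with the indexed values
theorem pairs_eq (bs : List Int) :
    (PySem.List.pyRange ((bs.length : Int) - 2) (-1) (-1)).zip
        (PySem.List.slice ((PySem.List.slice? bs none none (-1)).getD []) (some 1) none)
      = (PySem.List.pyRange ((bs.length : Int) - 2) (-1) (-1)).map
          (fun i => (i, PySem.List.pyGetD bs i 0)) := by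
  rw [PySem.List.slice?_none_none_neg_one]
  rw [show ((some bs.reverse).getD [] : List Int) = bs.reverse from rfl]
  rw [PySem.List.slice_from_one]
  rw [PySem.List.pyRange_neg_one]
  have hlen : ((bs.length : Int) - 2 - -1).toNat = bs.length - 1 := by omega
  rw [hlen]
  apply List.ext_getElem
  · simp
  · intro k h1 h2
    have hk : k < bs.length - 1 := by simpa using h2
    simp only [List.getElem_zip, List.getElem_map, List.getElem_tail, List.getElem_reverse,
      List.getElem_range]
    congr 1
    have : ((bs.length:Int) - 2 - (k:Int)) = ((bs.length - 2 - k : Nat) : Int) := by omega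
    rw [this, PySem.List.pyGetD_natCast]
    rw [List.getD_eq_getElem _ _ (by omega)]
    congr 1
    omega

-- A's loop collects the takeWhile-prefix of the scanned indices
theorem loopA_eq (last : Int) (g : Int → Int) :
    ∀ (l acc : List Int),
      getMarkersLoopA last (l.map (fun i => (i, g i))) acc
        = acc ++ l.takeWhile (fun i => g i == last) := by
  intro l
  induction l with
  | nil => intro acc; simp [getMarkersLoopA]
  | cons i l ih =>
    intro acc
    by_cases h : g i = last
    · simp [getMarkersLoopA, h, ih]
    · simp [getMarkersLoopA, h]

-- B's forward foldl returns 1 + the last index failing p (or the default when all satisfy p)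
theorem foldlB_eq (p : Int → Bool) :
    ∀ (l : List Int) (a : Int),
      l.foldl (fun c i => if ¬ p i = true then i + 1 else c) a
        = ((l.reverse.find? (fun i => !p i)).map (· + 1)).getD a := by
  intro l
  induction l with
  | nil => intro a; simp
  | cons i l ih =>
    intro a
    rw [List.foldl_cons, ih, List.reverse_cons, List.find?_append]
    cases hf : l.reverse.find? (fun i => !p i) with
    | some j => simp
    | none =>
      by_cases h : p i
      · simp [h]
      · simp [h]

-- on a countdown range, getLastD of the takeWhile-prefix is that same quantity
theorem takeWhile_getLastD_eq_find? (p : Int → Bool) :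
    ∀ (n : Nat) (a : Int), a + 1 = (n : Int) →
      ((PySem.List.pyRange a (-1) (-1)).takeWhile p).getLastD (a + 1)
        = (((PySem.List.pyRange a (-1) (-1)).find? (fun i => !p i)).map (· + 1)).getD 0 := by
  intro n
  induction n with
  | zero =>
    intro a ha
    rw [PySem.List.pyRange_neg_one_eq_nil (by omega)]
    simp; omega
  | succ n ih =>
    intro a ha
    rw [PySem.List.pyRange_neg_one_cons (show (-1:Int) < a by omega)]
    by_cases hp : p a
    · rw [List.takeWhile_cons_of_pos hp, List.getLastD_cons,
        List.find?_cons_of_neg (by simp [hp])]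
      have := ih (a - 1) (by omega)
      rw [show a - 1 + 1 = (a : Int) from by omega] at this
      exact this
    · rw [List.takeWhile_cons_of_neg (by simpa using hp),
        List.find?_cons_of_pos (by simp [hp])]
      simp

-- the takeWhile-prefix of a countdown range is the countdown range to its own last element
theorem takeWhile_countdown (p : Int → Bool) :
    ∀ (n : Nat) (a : Int), a + 1 = n →
      (PySem.List.pyRange a (-1) (-1)).takeWhile p
        = PySem.List.pyRange a (((PySem.List.pyRange a (-1) (-1)).takeWhile p).getLastD (a + 1) - 1) (-1) := by
  intro n
  induction n with
  | zero =>
    intro a ha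
    rw [PySem.List.pyRange_neg_one_eq_nil (by omega)]
    simp
  | succ n ih =>
    intro a ha
    rw [PySem.List.pyRange_neg_one_cons (show (-1:Int) < a by omega)]
    by_cases hp : p a
    · rw [List.takeWhile_cons_of_pos hp]
      have hih := ih (a - 1) (by omega)
      set t := (PySem.List.pyRange (a-1) (-1) (-1)).takeWhile p with ht
      have hpre : t <+: PySem.List.pyRange (a-1) (-1) (-1) := by
        rw [ht]; exact List.takeWhile_prefix p
      have hm : t.getLastD a ≤ a := by
        rcases List.mem_cons.mp (@List.getLastD_mem_cons _ t a) with h | h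
        · omega
        · have := PySem.List.mem_pyRange_neg_one.mp (List.IsPrefix.mem h hpre)
          omega
      rw [List.getLastD_cons]
      rw [show a - 1 + 1 = (a : Int) from by omega] at hih
      conv_lhs => rw [hih]
      rw [PySem.List.pyRange_neg_one_cons (show t.getLastD a - 1 < a by omega)]
    · rw [List.takeWhile_cons_of_neg (by simpa using hp)]
      simp

-- the last element of the countdown takeWhile-prefix stays within [0, a+1] when the default does
theorem getLastD_takeWhile_bounds (p : Int → Bool) (a d : Int) (hd0 : 0 ≤ d) (hd1 : d ≤ a + 1) :
    0 ≤ ((PySem.List.pyRange a (-1) (-1)).takeWhile p).getLastD d ∧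
      ((PySem.List.pyRange a (-1) (-1)).takeWhile p).getLastD d ≤ a + 1 := by
  set t := (PySem.List.pyRange a (-1) (-1)).takeWhile p with ht
  rcases List.mem_cons.mp (@List.getLastD_mem_cons _ t d) with h | h
  · omega
  · have hpre : t <+: PySem.List.pyRange a (-1) (-1) := by
      rw [ht]; exact List.takeWhile_prefix p
    have := PySem.List.mem_pyRange_neg_one.mp (List.IsPrefix.mem h hpre)
    omega

theorem get_markers_py_spec' (bs : List Int) (lr : Bool) (hne : bs ≠ []) :
    get_markers_py bs lr = get_markers_py_alt bs lr := by
  have hn : 1 ≤ bs.length := List.length_pos_iff.mpr hne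
  simp only [get_markers_py, get_markers_py_alt]
  rw [pairs_eq bs]
  rw [loopA_eq (PySem.List.pyGetD bs (-1) 0) (fun i => PySem.List.pyGetD bs i 0)]
  set p : Int → Bool := fun i => PySem.List.pyGetD bs i 0 == PySem.List.pyGetD bs (-1) 0 with hp
  set t := (PySem.List.pyRange ((bs.length:Int) - 2) (-1) (-1)).takeWhile p with ht
  set m := t.getLastD ((bs.length:Int) - 1) with hm
  -- B's foldl computes m
  have hcut : (PySem.List.pyRange 0 ((bs.length:Int) - 1) 1).foldl
      (fun c i => if PySem.List.pyGetD bs i 0 ≠ PySem.List.pyGetD bs (-1) 0 then i + 1 else c) 0 = m := by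
    have h1 : (PySem.List.pyRange 0 ((bs.length:Int) - 1) 1).foldl
        (fun c i => if PySem.List.pyGetD bs i 0 ≠ PySem.List.pyGetD bs (-1) 0 then i + 1 else c) 0
        = (PySem.List.pyRange 0 ((bs.length:Int) - 1) 1).foldl
            (fun c i => if ¬ p i = true then i + 1 else c) 0 := by
      congr 1
      funext c i
      by_cases h : PySem.List.pyGetD bs i 0 = PySem.List.pyGetD bs (-1) 0 <;> simp [hp, h]
    rw [h1, foldlB_eq p]
    have hrev : (PySem.List.pyRange 0 ((bs.length:Int) - 1) 1).reverse
        = PySem.List.pyRange ((bs.length:Int) - 2) (-1) (-1) := by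
      rw [PySem.List.pyRange_neg_one_eq_reverse]
      norm_num
      rw [show ((bs.length:Int) - 2 + 1) = (bs.length:Int) - 1 from by omega]
    rw [hrev]
    have := takeWhile_getLastD_eq_find? p (bs.length - 1) ((bs.length:Int) - 2) (by omega)
    rw [show ((bs.length:Int) - 2 + 1) = (bs.length:Int) - 1 from by omega] at this
    rw [← this, ← ht, ← hm]
  rw [hcut]
  have hbounds := getLastD_takeWhile_bounds p ((bs.length:Int) - 2) ((bs.length:Int) - 1)
      (by omega) (by omega)
  rw [show ((bs.length:Int) - 2 + 1) = (bs.length:Int) - 1 from by omega] at hbounds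
  have hm0 : 0 ≤ m := by rw [hm, ht]; exact hbounds.1
  have hm1 : m ≤ (bs.length:Int) - 1 := by rw [hm, ht]; exact hbounds.2
  have htw := takeWhile_countdown p (bs.length - 1) ((bs.length:Int) - 2) (by omega)
  rw [show ((bs.length:Int) - 2 + 1) = (bs.length:Int) - 1 from by omega] at htw
  have hmark : ([(bs.length:Int) - 1] ++ t)
      = PySem.List.pyRange ((bs.length:Int) - 1) (m - 1) (-1) := by
    rw [List.singleton_append]
    conv_lhs => rw [ht, htw]
    rw [PySem.List.pyRange_neg_one_cons (show m - 1 < (bs.length:Int) - 1 from by omega)]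
    rw [show ((bs.length:Int) - 1 - 1) = (bs.length:Int) - 2 from by omega]
  rw [hmark]
  have hnodup : (PySem.List.pyRange ((bs.length:Int) - 1) (m - 1) (-1)).Nodup := by
    rw [PySem.List.pyRange_neg_one_eq_reverse]
    exact List.nodup_reverse.mpr (PySem.List.nodup_pyRange_one _ _)
  cases lr
  · -- not last_run: set(range(nqubits)) - markers  vs  set(range(cut))
    rw [if_neg (show ¬(false = true) by simp)]
    rw [PySem.Set.ofList_eq_self_of_nodup _ hnodup]
    rw [PySem.Set.ofList_eq_self_of_nodup _ (PySem.List.nodup_pyRange_one _ _)]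
    rw [PySem.Set.ofList_eq_self_of_nodup _ (PySem.List.nodup_pyRange_one _ _)]
    rw [show (PySem.Set.diff (PySem.List.pyRange 0 (bs.length:Int) 1)
          (PySem.List.pyRange ((bs.length:Int) - 1) (m - 1) (-1)))
        = (PySem.List.pyRange 0 (bs.length:Int) 1).filter
            (fun x => !PySem.Set.contains (PySem.List.pyRange ((bs.length:Int) - 1) (m - 1) (-1)) x)
      from rfl]
    rw [PySem.List.pyRange_one_append 0 m (bs.length:Int) (by omega) (by omega), List.filter_append]
    have h1 : (PySem.List.pyRange 0 m 1).filter
        (fun x => !PySem.Set.contains (PySem.List.pyRange ((bs.length:Int) - 1) (m - 1) (-1)) x)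
        = PySem.List.pyRange 0 m 1 := by
      apply List.filter_eq_self.mpr
      intro x hx
      have hxr := PySem.List.mem_pyRange_one.mp hx
      simp [PySem.List.mem_pyRange_neg_one]
      omega
    have h2 : (PySem.List.pyRange m (bs.length:Int) 1).filter
        (fun x => !PySem.Set.contains (PySem.List.pyRange ((bs.length:Int) - 1) (m - 1) (-1)) x)
        = [] := by
      apply List.filter_eq_nil_iff.mpr
      intro x hx
      have hxr := PySem.List.mem_pyRange_one.mp hx
      simp [PySem.List.mem_pyRange_neg_one]
      omega
    rw [h1, h2, List.append_nil]
    simp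
  · -- last_run: both are the same countdown list
    simp only [Bool.not_true, Bool.false_eq_true, if_pos]
    rfl

-- ===== VERDICT (by name: the statements are the Claim_ definitions above) =====
theorem get_markers_py_spec : Claim_unchanged_get_markers_py := by
  intro bs lr _
  unfold Spec_get_markers_py
  intro hD
  rcases eq_or_ne bs [] with rfl | hne
  · cases lr
    · rfl
    · exact absurd ⟨rfl, rfl⟩ hD
  · exact get_markers_py_spec' bs lr hne

theorem get_markers_py_changed : Claim_changed_get_markers_py := by
  unfold Claim_changed_get_markers_py; decide

theorem get_markers_py_tight : Claim_exact_get_markers_py := by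
  intro bs lr _ hD
  obtain ⟨rfl, rfl⟩ := hD
  decide
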